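-- pv_equiv track=rewrite | github.com/pARHA-CS/ml-webscrap-tennis | src/preprocessing/preprocessing.py | get_tournament_category
-- ===== SOURCE A (Python) =====
-- def get_tournament_category(tournament_name) -> int:
--     """
--     Détermine la catégorie du tournoi en fonction de son nom.
--
--     Args:
--         tournament_name (str): Nom du tournoi.
--
--     Returns:
--         int: La catégorie du tournoi (4 = Grand Slam, 3 = Masters ou ATP Finals, 2 = ATP 500, 1 = ATP 250).
--     """
--     tournament_name = tournament_name.lower()
--
--     if any(
--         grand_slam in tournament_name
--         for grand_slam in ["australian open", "roland garros", "wimbledon", "u.s. open"]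
--     ):
--         return 4
--
--     elif "atp finals" in tournament_name or "laver cup" in tournament_name:
--         return 3
--
--     elif any(
--         masters in tournament_name
--         for masters in [
--             "indian wells",
--             "miami",
--             "monte carlo",
--             "madrid",
--             "rome",
--             "canada",
--             "cincinnati",
--             "shanghai",
--             "paris",
--         ]
--     ):
--         return 3
--
--     elif any(
--         atp_500 in tournament_name
--         for atp_500 in [
--             "rotterdam",
--             "dubai",
--             "acapulco",
--             "barcelona",
--             "queen",
--             "halle",
--             "hamburg",
--             "beijing",
--             "tokyo",
--             "vienna",
--             "basel",
--         ]
--     ):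
--         return 2
--
--     else:
--         return 1
-- ===== SOURCE B (Python) =====
-- # Category of each keyword; the result is the MAXIMUM category among all
-- # keywords occurring in the (lowercased) name, defaulting to 1.  This is
-- # order-independent, unlike A's priority cascade; it agrees with A because
-- # A happens to test categories in descending order.
-- KEYWORD_CATEGORY = {
--     "australian open": 4, "roland garros": 4, "wimbledon": 4, "u.s. open": 4,
--     "atp finals": 3, "laver cup": 3,
--     "indian wells": 3, "miami": 3, "monte carlo": 3, "madrid": 3, "rome": 3,
--     "canada": 3, "cincinnati": 3, "shanghai": 3, "paris": 3,
--     "rotterdam": 2, "dubai": 2, "acapulco": 2, "barcelona": 2, "queen": 2,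
--     "halle": 2, "hamburg": 2, "beijing": 2, "tokyo": 2, "vienna": 2, "basel": 2,
-- }
--
--
-- def get_tournament_category(tournament_name) -> int:
--     name = tournament_name.lower()
--     return max(
--         (cat for kw, cat in KEYWORD_CATEGORY.items() if kw in name),
--         default=1,
--     )
-- ===== Notes on version B (the rewrite author's own statement) =====
-- stated objective: alternative
-- what changed: B replaces A's ordered if/elif priority cascade by an order-independent reduction: it takes the maximum category over all keywords from a flat keyword-to-category map that occur in the lowercased name (default 1); this agrees with A because A's cascade tests categories in descending order.
import Mathlib
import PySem

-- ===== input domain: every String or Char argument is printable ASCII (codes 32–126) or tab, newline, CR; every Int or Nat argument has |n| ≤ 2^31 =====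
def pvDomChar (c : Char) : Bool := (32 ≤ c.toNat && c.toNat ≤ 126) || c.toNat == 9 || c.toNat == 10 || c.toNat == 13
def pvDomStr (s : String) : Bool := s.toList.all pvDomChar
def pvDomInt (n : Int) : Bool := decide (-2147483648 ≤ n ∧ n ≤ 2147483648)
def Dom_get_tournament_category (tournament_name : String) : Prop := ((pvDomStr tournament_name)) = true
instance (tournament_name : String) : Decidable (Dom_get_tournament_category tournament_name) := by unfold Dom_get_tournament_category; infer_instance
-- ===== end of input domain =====

-- B replaces A's priority cascade by the maximum category over all matching keywords (objective: alternative).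

-- ===== PORT A =====
def get_tournament_category (tournament_name : String) : Int :=
  let name := PySem.Str.lower tournament_name
  if ["australian open", "roland garros", "wimbledon", "u.s. open"].any
      (fun grand_slam => PySem.Str.isIn grand_slam name) then 4
  else if PySem.Str.isIn "atp finals" name || PySem.Str.isIn "laver cup" name then 3
  else if ["indian wells", "miami", "monte carlo", "madrid", "rome",
           "canada", "cincinnati", "shanghai", "paris"].any
      (fun masters => PySem.Str.isIn masters name) then 3
  else if ["rotterdam", "dubai", "acapulco", "barcelona", "queen", "halle",
           "hamburg", "beijing", "tokyo", "vienna", "basel"].any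
      (fun atp_500 => PySem.Str.isIn atp_500 name) then 2
  else 1

-- ===== PORT B =====
def pvKeywordCategory : List (String × Int) :=
  [ ("australian open", 4), ("roland garros", 4), ("wimbledon", 4), ("u.s. open", 4),
    ("atp finals", 3), ("laver cup", 3),
    ("indian wells", 3), ("miami", 3), ("monte carlo", 3), ("madrid", 3), ("rome", 3),
    ("canada", 3), ("cincinnati", 3), ("shanghai", 3), ("paris", 3),
    ("rotterdam", 2), ("dubai", 2), ("acapulco", 2), ("barcelona", 2), ("queen", 2),
    ("halle", 2), ("hamburg", 2), ("beijing", 2), ("tokyo", 2), ("vienna", 2), ("basel", 2) ]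

-- max(..., default=1) over the categories of the matching keywords, as a fold
def get_tournament_category_alt (tournament_name : String) : Int :=
  let name := PySem.Str.lower tournament_name
  pvKeywordCategory.foldl
    (fun best p => if PySem.Str.isIn p.1 name then max best p.2 else best) 1

-- ===== PRECONDITION & SPEC =====
def Spec_get_tournament_category (tournament_name : String) (out : Int) : Prop := out = get_tournament_category_alt tournament_name
instance (tournament_name : String) (out : Int) : Decidable (Spec_get_tournament_category tournament_name out) := by unfold Spec_get_tournament_category; infer_instance

-- ===== CLAIM (what is proved, stated in full; the proofs are below) =====
def Claim_equal_get_tournament_category : Prop := ∀ (tournament_name : String), Dom_get_tournament_category tournament_name → Spec_get_tournament_category tournament_name (get_tournament_category tournament_name)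

-- ===== LEMMAS AND PROOFS =====

-- folding max over a constant-category group: either some keyword matches (max in c) or none does
theorem pv_foldl_const_group (name : String) (c a : Int) (l : List (String × Int))
    (h : ∀ p ∈ l, p.2 = c) :
    l.foldl (fun best p => if PySem.Str.isIn p.1 name then max best p.2 else best) a
      = if l.any (fun p => PySem.Str.isIn p.1 name) then max a c else a := by
  induction l generalizing a with
  | nil => simp
  | cons p l ih =>
      have hp : p.2 = c := h p (List.mem_cons_self ..)
      have hl : ∀ q ∈ l, q.2 = c := fun q hq => h q (List.mem_cons_of_mem _ hq)
      simp only [List.foldl_cons, List.any_cons]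
      by_cases hm : PySem.Str.isIn p.1 name
      · rw [if_pos hm, hp, ih _ hl]
        simp only [hm, Bool.true_or, if_true]
        split_ifs <;> simp
      · rw [if_neg hm, ih _ hl]
        rw [Bool.not_eq_true] at hm
        simp only [PySem.Str.isIn] at hm
        simp only [PySem.Str.isIn, hm, Bool.false_or]
        rfl

-- ===== VERDICT (by name: the statement is the Claim_ definition above) =====
theorem get_tournament_category_spec : Claim_equal_get_tournament_category := by
  intro t _
  unfold Spec_get_tournament_category get_tournament_category get_tournament_category_alt
  set name := PySem.Str.lower t with hname
  have htable : pvKeywordCategory =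
      ([("australian open", (4:Int)), ("roland garros", 4), ("wimbledon", 4), ("u.s. open", 4)]
        ++ [("atp finals", 3), ("laver cup", 3),
            ("indian wells", 3), ("miami", 3), ("monte carlo", 3), ("madrid", 3), ("rome", 3),
            ("canada", 3), ("cincinnati", 3), ("shanghai", 3), ("paris", 3)]
        ++ [("rotterdam", 2), ("dubai", 2), ("acapulco", 2), ("barcelona", 2), ("queen", 2),
            ("halle", 2), ("hamburg", 2), ("beijing", 2), ("tokyo", 2), ("vienna", 2), ("basel", 2)]) := by
    rfl
  rw [htable, List.foldl_append, List.foldl_append]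
  rw [pv_foldl_const_group name 4 1
        [("australian open", (4:Int)), ("roland garros", 4), ("wimbledon", 4), ("u.s. open", 4)]
        (by decide)]
  rw [pv_foldl_const_group name 3 _
        [("atp finals", (3:Int)), ("laver cup", 3),
         ("indian wells", 3), ("miami", 3), ("monte carlo", 3), ("madrid", 3), ("rome", 3),
         ("canada", 3), ("cincinnati", 3), ("shanghai", 3), ("paris", 3)]
        (by decide)]
  rw [pv_foldl_const_group name 2 _
        [("rotterdam", (2:Int)), ("dubai", 2), ("acapulco", 2), ("barcelona", 2), ("queen", 2),
         ("halle", 2), ("hamburg", 2), ("beijing", 2), ("tokyo", 2), ("vienna", 2), ("basel", 2)]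
        (by decide)]
  simp only [List.any_cons, List.any_nil, Bool.or_false]
  split_ifs <;> simp_all
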